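-- pv_equiv track=rewrite | github.com/nlitsme/EnergieLeveranciers | summarizeeneco.py | enecojaar
-- ===== SOURCE A (Python) =====
-- def enecojaar(t):
--     # Dit zijn de datums waarop mijn eneco contract van tarief wisselt.
--     datums = ["2013-03-16", "2014-03-11", "2015-03-29", "2016-03-29", "2017-03-22", "2018-03-22", "2019-03-24", "2020-03-24", "2021-03-24", "2022-03-24" ]
--
--     if t<datums[0]:
--         return "2012"
--     for a, b in zip(datums, datums[1:]):
--         if a <= t < b:
--             return a[:4]
--     return "2022"
-- ===== SOURCE B (Python) =====
-- def enecojaar(t):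
--     # Dit zijn de datums waarop mijn eneco contract van tarief wisselt.
--     datums = ["2013-03-16", "2014-03-11", "2015-03-29", "2016-03-29", "2017-03-22", "2018-03-22", "2019-03-24", "2020-03-24", "2021-03-24", "2022-03-24" ]
--
--     # binary search for the first boundary strictly greater than t (bisect_right)
--     lo, hi = 0, len(datums)
--     while lo < hi:
--         mid = (lo + hi) // 2
--         if t < datums[mid]:
--             hi = mid
--         else:
--             lo = mid + 1
--     if lo == 0:
--         return "2012"
--     return datums[lo - 1][:4]
-- ===== Notes on version B (the rewrite author's own statement) =====
-- stated objective: idiomatic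
-- what changed: Replaces the explicit pairwise zip(datums, datums[1:]) scan with a binary search (hand-rolled bisect_right) for the first boundary strictly greater than t, then reads the bucket from the index.
import Mathlib
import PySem

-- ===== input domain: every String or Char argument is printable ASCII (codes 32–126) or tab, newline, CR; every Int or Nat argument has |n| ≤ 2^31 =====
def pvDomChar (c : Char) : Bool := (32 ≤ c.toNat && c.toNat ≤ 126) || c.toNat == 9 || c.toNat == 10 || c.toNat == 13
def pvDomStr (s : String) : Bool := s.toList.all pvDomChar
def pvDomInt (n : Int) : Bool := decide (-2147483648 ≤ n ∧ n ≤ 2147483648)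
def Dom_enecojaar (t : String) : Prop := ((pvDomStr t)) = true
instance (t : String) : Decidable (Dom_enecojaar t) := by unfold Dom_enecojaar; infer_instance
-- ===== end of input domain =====

-- B replaces A's linear pairwise zip scan by a binary search for the first boundary
-- strictly greater than t (bisect_right by hand), same result on every input.

-- ===== PORT A =====
-- the tariff-change dates of A (as List Char; Python str comparison = Lean's `<` on toList)
def enecoDatumsA : List (List Char) :=
  ["2013-03-16".toList, "2014-03-11".toList, "2015-03-29".toList, "2016-03-29".toList, "2017-03-22".toList, "2018-03-22".toList, "2019-03-24".toList, "2020-03-24".toList, "2021-03-24".toList, "2022-03-24".toList]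

-- A's for-loop over zip(datums, datums[1:]) with early return; [] falls through to "2022"
def enecoScanA : List (List Char × List Char) → List Char → String
  | [], _ => "2022"
  | (a, b) :: rest, t => if a ≤ t ∧ t < b then String.ofList (PySem.List.slice a none (some 4)) else enecoScanA rest t

def enecojaar (t : String) : String :=
  let datums := enecoDatumsA
  if t.toList < PySem.List.pyGetD datums 0 [] then "2012"
  else enecoScanA (datums.zip (PySem.List.slice datums (some 1) none)) t.toList

-- ===== PORT B =====
def enecoDatumsB : List (List Char) :=
  ["2013-03-16".toList, "2014-03-11".toList, "2015-03-29".toList, "2016-03-29".toList, "2017-03-22".toList, "2018-03-22".toList, "2019-03-24".toList, "2020-03-24".toList, "2021-03-24".toList, "2022-03-24".toList]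

-- B's while-loop binary search (bisect_right): fuel = list length bounds the iterations
def enecoBisect (xs : List (List Char)) (t : List Char) : Nat → Nat → Nat → Nat
  | 0, lo, _ => lo
  | fuel + 1, lo, hi =>
    if lo < hi then
      let mid := (lo + hi) / 2
      if t < PySem.List.pyGetD xs (mid : Int) [] then enecoBisect xs t fuel lo mid
      else enecoBisect xs t fuel (mid + 1) hi
    else lo

def enecojaar_alt (t : String) : String :=
  let datums := enecoDatumsB
  let lo := enecoBisect datums t.toList datums.length 0 datums.length
  if lo = 0 then "2012"
  else String.ofList (PySem.List.slice (PySem.List.pyGetD datums ((lo : Int) - 1) []) none (some 4))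

-- ===== PRECONDITION & SPEC =====
def Spec_enecojaar (t : String) (out : String) : Prop := out = enecojaar_alt t
instance (t : String) (out : String) : Decidable (Spec_enecojaar t out) := by unfold Spec_enecojaar; infer_instance

-- ===== CLAIM (what is proved, stated in full; the proofs are below) =====
def Claim_equal_enecojaar : Prop := ∀ (t : String), Dom_enecojaar t → Spec_enecojaar t (enecojaar t)

-- ===== LEMMAS AND PROOFS =====
-- case split on which contract-year bucket t falls in; in each bucket both sides reduce to the same literal
theorem eneco_eq (t : List Char) : enecojaar (String.ofList t) = enecojaar_alt (String.ofList t) := by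
  simp only [enecojaar, enecojaar_alt, enecoDatumsA, enecoDatumsB, 
    PySem.List.pyGetD, PySem.List.slice, String.toList_ofList]
  by_cases h0 : t < (['2', '0', '1', '3', '-', '0', '3', '-', '1', '6'] : List Char)
  · -- bucket below 2013-03-16
    have h1 : t < (['2', '0', '1', '4', '-', '0', '3', '-', '1', '1'] : List Char) := lt_of_lt_of_le h0 (by decide)
    have h2 : t < (['2', '0', '1', '5', '-', '0', '3', '-', '2', '9'] : List Char) := lt_of_lt_of_le h0 (by decide)
    have h3 : t < (['2', '0', '1', '6', '-', '0', '3', '-', '2', '9'] : List Char) := lt_of_lt_of_le h0 (by decide)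
    have h4 : t < (['2', '0', '1', '7', '-', '0', '3', '-', '2', '2'] : List Char) := lt_of_lt_of_le h0 (by decide)
    have h5 : t < (['2', '0', '1', '8', '-', '0', '3', '-', '2', '2'] : List Char) := lt_of_lt_of_le h0 (by decide)
    have h6 : t < (['2', '0', '1', '9', '-', '0', '3', '-', '2', '4'] : List Char) := lt_of_lt_of_le h0 (by decide)
    have h7 : t < (['2', '0', '2', '0', '-', '0', '3', '-', '2', '4'] : List Char) := lt_of_lt_of_le h0 (by decide)
    have h8 : t < (['2', '0', '2', '1', '-', '0', '3', '-', '2', '4'] : List Char) := lt_of_lt_of_le h0 (by decide)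
    have h9 : t < (['2', '0', '2', '2', '-', '0', '3', '-', '2', '4'] : List Char) := lt_of_lt_of_le h0 (by decide)
    simp [enecoBisect, PySem.List.pyGetD, PySem.List.pyGet?, PySem.List.pyIdx?, h0, h1, h2, h5]
  by_cases h1 : t < (['2', '0', '1', '4', '-', '0', '3', '-', '1', '1'] : List Char)
  · -- bucket below 2014-03-11
    have h2 : t < (['2', '0', '1', '5', '-', '0', '3', '-', '2', '9'] : List Char) := lt_of_lt_of_le h1 (by decide)
    have h3 : t < (['2', '0', '1', '6', '-', '0', '3', '-', '2', '9'] : List Char) := lt_of_lt_of_le h1 (by decide)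
    have h4 : t < (['2', '0', '1', '7', '-', '0', '3', '-', '2', '2'] : List Char) := lt_of_lt_of_le h1 (by decide)
    have h5 : t < (['2', '0', '1', '8', '-', '0', '3', '-', '2', '2'] : List Char) := lt_of_lt_of_le h1 (by decide)
    have h6 : t < (['2', '0', '1', '9', '-', '0', '3', '-', '2', '4'] : List Char) := lt_of_lt_of_le h1 (by decide)
    have h7 : t < (['2', '0', '2', '0', '-', '0', '3', '-', '2', '4'] : List Char) := lt_of_lt_of_le h1 (by decide)
    have h8 : t < (['2', '0', '2', '1', '-', '0', '3', '-', '2', '4'] : List Char) := lt_of_lt_of_le h1 (by decide)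
    have h9 : t < (['2', '0', '2', '2', '-', '0', '3', '-', '2', '4'] : List Char) := lt_of_lt_of_le h1 (by decide)
    have le0 : (['2', '0', '1', '3', '-', '0', '3', '-', '1', '6'] : List Char) ≤ t := not_lt.mp h0
    simp [enecoScanA, enecoBisect, PySem.List.pyGetD, PySem.List.pyGet?, PySem.List.pyIdx?, PySem.List.slice, h0, h1, h2, h5, le0]
  by_cases h2 : t < (['2', '0', '1', '5', '-', '0', '3', '-', '2', '9'] : List Char)
  · -- bucket below 2015-03-29
    have h3 : t < (['2', '0', '1', '6', '-', '0', '3', '-', '2', '9'] : List Char) := lt_of_lt_of_le h2 (by decide)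
    have h4 : t < (['2', '0', '1', '7', '-', '0', '3', '-', '2', '2'] : List Char) := lt_of_lt_of_le h2 (by decide)
    have h5 : t < (['2', '0', '1', '8', '-', '0', '3', '-', '2', '2'] : List Char) := lt_of_lt_of_le h2 (by decide)
    have h6 : t < (['2', '0', '1', '9', '-', '0', '3', '-', '2', '4'] : List Char) := lt_of_lt_of_le h2 (by decide)
    have h7 : t < (['2', '0', '2', '0', '-', '0', '3', '-', '2', '4'] : List Char) := lt_of_lt_of_le h2 (by decide)
    have h8 : t < (['2', '0', '2', '1', '-', '0', '3', '-', '2', '4'] : List Char) := lt_of_lt_of_le h2 (by decide)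
    have h9 : t < (['2', '0', '2', '2', '-', '0', '3', '-', '2', '4'] : List Char) := lt_of_lt_of_le h2 (by decide)
    have le0 : (['2', '0', '1', '3', '-', '0', '3', '-', '1', '6'] : List Char) ≤ t := not_lt.mp h0
    have le1 : (['2', '0', '1', '4', '-', '0', '3', '-', '1', '1'] : List Char) ≤ t := not_lt.mp h1
    simp [enecoScanA, enecoBisect, PySem.List.pyGetD, PySem.List.pyGet?, PySem.List.pyIdx?, PySem.List.slice, h0, h1, h2, h5, le0, le1]
  by_cases h3 : t < (['2', '0', '1', '6', '-', '0', '3', '-', '2', '9'] : List Char)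
  · -- bucket below 2016-03-29
    have h4 : t < (['2', '0', '1', '7', '-', '0', '3', '-', '2', '2'] : List Char) := lt_of_lt_of_le h3 (by decide)
    have h5 : t < (['2', '0', '1', '8', '-', '0', '3', '-', '2', '2'] : List Char) := lt_of_lt_of_le h3 (by decide)
    have h6 : t < (['2', '0', '1', '9', '-', '0', '3', '-', '2', '4'] : List Char) := lt_of_lt_of_le h3 (by decide)
    have h7 : t < (['2', '0', '2', '0', '-', '0', '3', '-', '2', '4'] : List Char) := lt_of_lt_of_le h3 (by decide)
    have h8 : t < (['2', '0', '2', '1', '-', '0', '3', '-', '2', '4'] : List Char) := lt_of_lt_of_le h3 (by decide)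
    have h9 : t < (['2', '0', '2', '2', '-', '0', '3', '-', '2', '4'] : List Char) := lt_of_lt_of_le h3 (by decide)
    have le0 : (['2', '0', '1', '3', '-', '0', '3', '-', '1', '6'] : List Char) ≤ t := not_lt.mp h0
    have le1 : (['2', '0', '1', '4', '-', '0', '3', '-', '1', '1'] : List Char) ≤ t := not_lt.mp h1
    have le2 : (['2', '0', '1', '5', '-', '0', '3', '-', '2', '9'] : List Char) ≤ t := not_lt.mp h2
    simp [enecoScanA, enecoBisect, PySem.List.pyGetD, PySem.List.pyGet?, PySem.List.pyIdx?, PySem.List.slice, h0, h1, h2, h3, h4, h5, le0, le1, le2]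
  by_cases h4 : t < (['2', '0', '1', '7', '-', '0', '3', '-', '2', '2'] : List Char)
  · -- bucket below 2017-03-22
    have h5 : t < (['2', '0', '1', '8', '-', '0', '3', '-', '2', '2'] : List Char) := lt_of_lt_of_le h4 (by decide)
    have h6 : t < (['2', '0', '1', '9', '-', '0', '3', '-', '2', '4'] : List Char) := lt_of_lt_of_le h4 (by decide)
    have h7 : t < (['2', '0', '2', '0', '-', '0', '3', '-', '2', '4'] : List Char) := lt_of_lt_of_le h4 (by decide)
    have h8 : t < (['2', '0', '2', '1', '-', '0', '3', '-', '2', '4'] : List Char) := lt_of_lt_of_le h4 (by decide)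
    have h9 : t < (['2', '0', '2', '2', '-', '0', '3', '-', '2', '4'] : List Char) := lt_of_lt_of_le h4 (by decide)
    have le0 : (['2', '0', '1', '3', '-', '0', '3', '-', '1', '6'] : List Char) ≤ t := not_lt.mp h0
    have le1 : (['2', '0', '1', '4', '-', '0', '3', '-', '1', '1'] : List Char) ≤ t := not_lt.mp h1
    have le2 : (['2', '0', '1', '5', '-', '0', '3', '-', '2', '9'] : List Char) ≤ t := not_lt.mp h2
    have le3 : (['2', '0', '1', '6', '-', '0', '3', '-', '2', '9'] : List Char) ≤ t := not_lt.mp h3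
    simp [enecoScanA, enecoBisect, PySem.List.pyGetD, PySem.List.pyGet?, PySem.List.pyIdx?, PySem.List.slice, h0, h1, h2, h3, h4, h5, le0, le1, le2, le3]
  by_cases h5 : t < (['2', '0', '1', '8', '-', '0', '3', '-', '2', '2'] : List Char)
  · -- bucket below 2018-03-22
    have h6 : t < (['2', '0', '1', '9', '-', '0', '3', '-', '2', '4'] : List Char) := lt_of_lt_of_le h5 (by decide)
    have h7 : t < (['2', '0', '2', '0', '-', '0', '3', '-', '2', '4'] : List Char) := lt_of_lt_of_le h5 (by decide)
    have h8 : t < (['2', '0', '2', '1', '-', '0', '3', '-', '2', '4'] : List Char) := lt_of_lt_of_le h5 (by decide)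
    have h9 : t < (['2', '0', '2', '2', '-', '0', '3', '-', '2', '4'] : List Char) := lt_of_lt_of_le h5 (by decide)
    have le0 : (['2', '0', '1', '3', '-', '0', '3', '-', '1', '6'] : List Char) ≤ t := not_lt.mp h0
    have le1 : (['2', '0', '1', '4', '-', '0', '3', '-', '1', '1'] : List Char) ≤ t := not_lt.mp h1
    have le2 : (['2', '0', '1', '5', '-', '0', '3', '-', '2', '9'] : List Char) ≤ t := not_lt.mp h2
    have le3 : (['2', '0', '1', '6', '-', '0', '3', '-', '2', '9'] : List Char) ≤ t := not_lt.mp h3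
    have le4 : (['2', '0', '1', '7', '-', '0', '3', '-', '2', '2'] : List Char) ≤ t := not_lt.mp h4
    simp [enecoScanA, enecoBisect, PySem.List.pyGetD, PySem.List.pyGet?, PySem.List.pyIdx?, PySem.List.slice, h0, h1, h2, h3, h4, h5, le0, le1, le2, le3, le4]
  by_cases h6 : t < (['2', '0', '1', '9', '-', '0', '3', '-', '2', '4'] : List Char)
  · -- bucket below 2019-03-24
    have h7 : t < (['2', '0', '2', '0', '-', '0', '3', '-', '2', '4'] : List Char) := lt_of_lt_of_le h6 (by decide)
    have h8 : t < (['2', '0', '2', '1', '-', '0', '3', '-', '2', '4'] : List Char) := lt_of_lt_of_le h6 (by decide)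
    have h9 : t < (['2', '0', '2', '2', '-', '0', '3', '-', '2', '4'] : List Char) := lt_of_lt_of_le h6 (by decide)
    have le0 : (['2', '0', '1', '3', '-', '0', '3', '-', '1', '6'] : List Char) ≤ t := not_lt.mp h0
    have le1 : (['2', '0', '1', '4', '-', '0', '3', '-', '1', '1'] : List Char) ≤ t := not_lt.mp h1
    have le2 : (['2', '0', '1', '5', '-', '0', '3', '-', '2', '9'] : List Char) ≤ t := not_lt.mp h2
    have le3 : (['2', '0', '1', '6', '-', '0', '3', '-', '2', '9'] : List Char) ≤ t := not_lt.mp h3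
    have le4 : (['2', '0', '1', '7', '-', '0', '3', '-', '2', '2'] : List Char) ≤ t := not_lt.mp h4
    have le5 : (['2', '0', '1', '8', '-', '0', '3', '-', '2', '2'] : List Char) ≤ t := not_lt.mp h5
    simp [enecoScanA, enecoBisect, PySem.List.pyGetD, PySem.List.pyGet?, PySem.List.pyIdx?, PySem.List.slice, h0, h1, h2, h3, h4, h5, h6, h7, h8, le0, le1, le2, le3, le4, le5]
  by_cases h7 : t < (['2', '0', '2', '0', '-', '0', '3', '-', '2', '4'] : List Char)
  · -- bucket below 2020-03-24
    have h8 : t < (['2', '0', '2', '1', '-', '0', '3', '-', '2', '4'] : List Char) := lt_of_lt_of_le h7 (by decide)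
    have h9 : t < (['2', '0', '2', '2', '-', '0', '3', '-', '2', '4'] : List Char) := lt_of_lt_of_le h7 (by decide)
    have le0 : (['2', '0', '1', '3', '-', '0', '3', '-', '1', '6'] : List Char) ≤ t := not_lt.mp h0
    have le1 : (['2', '0', '1', '4', '-', '0', '3', '-', '1', '1'] : List Char) ≤ t := not_lt.mp h1
    have le2 : (['2', '0', '1', '5', '-', '0', '3', '-', '2', '9'] : List Char) ≤ t := not_lt.mp h2
    have le3 : (['2', '0', '1', '6', '-', '0', '3', '-', '2', '9'] : List Char) ≤ t := not_lt.mp h3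
    have le4 : (['2', '0', '1', '7', '-', '0', '3', '-', '2', '2'] : List Char) ≤ t := not_lt.mp h4
    have le5 : (['2', '0', '1', '8', '-', '0', '3', '-', '2', '2'] : List Char) ≤ t := not_lt.mp h5
    have le6 : (['2', '0', '1', '9', '-', '0', '3', '-', '2', '4'] : List Char) ≤ t := not_lt.mp h6
    simp [enecoScanA, enecoBisect, PySem.List.pyGetD, PySem.List.pyGet?, PySem.List.pyIdx?, PySem.List.slice, h0, h1, h2, h3, h4, h5, h6, h7, h8, le0, le1, le2, le3, le4, le5, le6]
  by_cases h8 : t < (['2', '0', '2', '1', '-', '0', '3', '-', '2', '4'] : List Char)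
  · -- bucket below 2021-03-24
    have h9 : t < (['2', '0', '2', '2', '-', '0', '3', '-', '2', '4'] : List Char) := lt_of_lt_of_le h8 (by decide)
    have le0 : (['2', '0', '1', '3', '-', '0', '3', '-', '1', '6'] : List Char) ≤ t := not_lt.mp h0
    have le1 : (['2', '0', '1', '4', '-', '0', '3', '-', '1', '1'] : List Char) ≤ t := not_lt.mp h1
    have le2 : (['2', '0', '1', '5', '-', '0', '3', '-', '2', '9'] : List Char) ≤ t := not_lt.mp h2
    have le3 : (['2', '0', '1', '6', '-', '0', '3', '-', '2', '9'] : List Char) ≤ t := not_lt.mp h3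
    have le4 : (['2', '0', '1', '7', '-', '0', '3', '-', '2', '2'] : List Char) ≤ t := not_lt.mp h4
    have le5 : (['2', '0', '1', '8', '-', '0', '3', '-', '2', '2'] : List Char) ≤ t := not_lt.mp h5
    have le6 : (['2', '0', '1', '9', '-', '0', '3', '-', '2', '4'] : List Char) ≤ t := not_lt.mp h6
    have le7 : (['2', '0', '2', '0', '-', '0', '3', '-', '2', '4'] : List Char) ≤ t := not_lt.mp h7
    simp [enecoScanA, enecoBisect, PySem.List.pyGetD, PySem.List.pyGet?, PySem.List.pyIdx?, PySem.List.slice, h0, h1, h2, h3, h4, h5, h6, h7, h8, le0, le1, le2, le3, le4, le5, le6, le7]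
  by_cases h9 : t < (['2', '0', '2', '2', '-', '0', '3', '-', '2', '4'] : List Char)
  · -- bucket below 2022-03-24
    have le0 : (['2', '0', '1', '3', '-', '0', '3', '-', '1', '6'] : List Char) ≤ t := not_lt.mp h0
    have le1 : (['2', '0', '1', '4', '-', '0', '3', '-', '1', '1'] : List Char) ≤ t := not_lt.mp h1
    have le2 : (['2', '0', '1', '5', '-', '0', '3', '-', '2', '9'] : List Char) ≤ t := not_lt.mp h2
    have le3 : (['2', '0', '1', '6', '-', '0', '3', '-', '2', '9'] : List Char) ≤ t := not_lt.mp h3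
    have le4 : (['2', '0', '1', '7', '-', '0', '3', '-', '2', '2'] : List Char) ≤ t := not_lt.mp h4
    have le5 : (['2', '0', '1', '8', '-', '0', '3', '-', '2', '2'] : List Char) ≤ t := not_lt.mp h5
    have le6 : (['2', '0', '1', '9', '-', '0', '3', '-', '2', '4'] : List Char) ≤ t := not_lt.mp h6
    have le7 : (['2', '0', '2', '0', '-', '0', '3', '-', '2', '4'] : List Char) ≤ t := not_lt.mp h7
    have le8 : (['2', '0', '2', '1', '-', '0', '3', '-', '2', '4'] : List Char) ≤ t := not_lt.mp h8
    simp [enecoScanA, enecoBisect, PySem.List.pyGetD, PySem.List.pyGet?, PySem.List.pyIdx?, PySem.List.slice, h0, h1, h2, h3, h4, h5, h6, h7, h8, h9, le0, le1, le2, le3, le4, le5, le6, le7, le8]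
  -- bucket: t ≥ all boundaries
  have le0 : (['2', '0', '1', '3', '-', '0', '3', '-', '1', '6'] : List Char) ≤ t := not_lt.mp h0
  have le1 : (['2', '0', '1', '4', '-', '0', '3', '-', '1', '1'] : List Char) ≤ t := not_lt.mp h1
  have le2 : (['2', '0', '1', '5', '-', '0', '3', '-', '2', '9'] : List Char) ≤ t := not_lt.mp h2
  have le3 : (['2', '0', '1', '6', '-', '0', '3', '-', '2', '9'] : List Char) ≤ t := not_lt.mp h3
  have le4 : (['2', '0', '1', '7', '-', '0', '3', '-', '2', '2'] : List Char) ≤ t := not_lt.mp h4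
  have le5 : (['2', '0', '1', '8', '-', '0', '3', '-', '2', '2'] : List Char) ≤ t := not_lt.mp h5
  have le6 : (['2', '0', '1', '9', '-', '0', '3', '-', '2', '4'] : List Char) ≤ t := not_lt.mp h6
  have le7 : (['2', '0', '2', '0', '-', '0', '3', '-', '2', '4'] : List Char) ≤ t := not_lt.mp h7
  have le8 : (['2', '0', '2', '1', '-', '0', '3', '-', '2', '4'] : List Char) ≤ t := not_lt.mp h8
  have le9 : (['2', '0', '2', '2', '-', '0', '3', '-', '2', '4'] : List Char) ≤ t := not_lt.mp h9
  simp [enecoScanA, enecoBisect, PySem.List.pyGetD, PySem.List.pyGet?, PySem.List.pyIdx?, h0, h1, h2, h3, h4, h5, h6, h7, h8, h9, le0, le1, le2, le3, le4, le5, le6, le7, le8]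

-- ===== VERDICT (by name: the statement is the Claim_ definition above) =====
theorem enecojaar_spec : Claim_equal_enecojaar := by
  intro t _
  unfold Spec_enecojaar
  have h := eneco_eq t.toList
  rwa [String.ofList_toList] at h
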